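-- pv_equiv track=rewrite | github.com/requirekit/require-kit | installer/global/lib/agent_enhancement/applier.py | _remove_boundaries_section
-- ===== SOURCE A (Python) =====
-- def _remove_boundaries_section(lines: list) -> list:
--     """
--     Remove the boundaries section from lines.
--
--     TASK-FIX-PD04: Used to remove generic boundaries before inserting AI-specific.
--
--     Args:
--         lines: List of lines from content
--
--     Returns:
--         List of lines with boundaries section removed
--     """
--     new_lines = []
--     in_boundaries = False
--
--     for line in lines:
--         if line.strip().startswith('## Boundaries'):
--             in_boundaries = True
--             continue
--         elif in_boundaries:
--             # Check if we've hit the next section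
--             if line.strip().startswith('## ') and not line.strip().startswith('### '):
--                 in_boundaries = False
--                 new_lines.append(line)
--             # Skip lines while in boundaries section
--             continue
--         else:
--             new_lines.append(line)
--
--     return new_lines
-- ===== SOURCE B (Python) =====
-- def _remove_boundaries_section(lines: list) -> list:
--     """Preamble + sections decomposition: split lines at top-level '## ' headers,
--     then keep every section whose header is not '## Boundaries'."""
--     def _is_top(line):
--         s = line.strip()
--         return s.startswith('## ') and not s.startswith('### ')
--
--     i = 0
--     while i < len(lines) and not _is_top(lines[i]):
--         i += 1
--     preamble = lines[:i]
--
--     sections = []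
--     for line in lines[i:]:
--         if _is_top(line):
--             sections.append([line])
--         else:
--             sections[-1].append(line)
--
--     result = list(preamble)
--     for sec in sections:
--         if not sec[0].strip().startswith('## Boundaries'):
--             result.extend(sec)
--     return result
-- ===== Notes on version B (the rewrite author's own statement) =====
-- stated objective: alternative
-- what changed: Replaces A's single stateful scan with a boolean in-boundaries flag by a two-pass decomposition: partition the lines into a preamble plus top-level '## ' sections, then concatenate the preamble with every section whose header is not '## Boundaries'.
import Mathlib
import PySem

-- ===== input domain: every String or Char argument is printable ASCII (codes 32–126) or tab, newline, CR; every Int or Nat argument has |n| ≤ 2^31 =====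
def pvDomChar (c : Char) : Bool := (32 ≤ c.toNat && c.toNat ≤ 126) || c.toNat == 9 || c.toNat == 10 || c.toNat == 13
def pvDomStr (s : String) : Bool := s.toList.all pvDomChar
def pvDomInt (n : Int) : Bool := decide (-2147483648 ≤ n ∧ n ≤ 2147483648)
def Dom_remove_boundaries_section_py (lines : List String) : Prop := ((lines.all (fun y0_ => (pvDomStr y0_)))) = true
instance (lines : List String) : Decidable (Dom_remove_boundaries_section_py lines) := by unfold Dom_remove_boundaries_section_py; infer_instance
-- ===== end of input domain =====

-- B replaces A's single stateful scan (in_boundaries flag) by a two-pass decomposition: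
-- partition into preamble + top-level '## ' sections, then keep every non-'## Boundaries' section (objective: alternative).

-- ===== PORT A =====
-- loop body of A's for-loop: state = (new_lines, in_boundaries)
def pvAStep (st : List String × Bool) (line : String) : List String × Bool :=
  let s := PySem.Str.strip line
  if PySem.Str.startswith s "## Boundaries" then
    (st.1, true)
  else if st.2 then
    if PySem.Str.startswith s "## " && !PySem.Str.startswith s "### " then
      (st.1 ++ [line], false)
    else
      (st.1, true)
  else
    (st.1 ++ [line], st.2)

def remove_boundaries_section_py (lines : List String) : List String :=
  (lines.foldl pvAStep ([], false)).1

-- ===== PORT B =====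
def pvIsTop (line : String) : Bool :=
  let s := PySem.Str.strip line
  PySem.Str.startswith s "## " && !PySem.Str.startswith s "### "

def pvIsBdry (line : String) : Bool :=
  PySem.Str.startswith (PySem.Str.strip line) "## Boundaries"

-- loop body of B's section-building loop; sections[-1].append(line) = replace the last section
-- (sections is never empty when that branch runs, since lines[i:] starts with a top-level header)
def pvBStep (secs : List (List String)) (line : String) : List (List String) :=
  if pvIsTop line then secs ++ [[line]]
  else secs.dropLast ++ [secs.getLastD [] ++ [line]]

-- loop body of B's filtering loop; sec[0] of a nonempty section = sec.headD ""
def pvFStep (res : List String) (sec : List String) : List String :=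
  if pvIsBdry (sec.headD "") then res else res ++ sec

def remove_boundaries_section_py_alt (lines : List String) : List String :=
  let preamble := lines.takeWhile (fun l => !pvIsTop l)
  let rest := lines.dropWhile (fun l => !pvIsTop l)
  let sections := rest.foldl pvBStep []
  sections.foldl pvFStep preamble

-- ===== PRECONDITION & SPEC =====
def Spec_remove_boundaries_section_py (lines : List String) (out : List String) : Prop := out = remove_boundaries_section_py_alt lines
instance (lines : List String) (out : List String) : Decidable (Spec_remove_boundaries_section_py lines out) := by unfold Spec_remove_boundaries_section_py; infer_instance

-- ===== CLAIM (what is proved, stated in full; the proofs are below) =====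
def Claim_equal_remove_boundaries_section_py : Prop := ∀ (lines : List String), Dom_remove_boundaries_section_py lines → Spec_remove_boundaries_section_py lines (remove_boundaries_section_py lines)

-- ===== LEMMAS AND PROOFS =====

-- reference recursion: what A's scan computes from flag b onwards
def pvR (ls : List String) (inB : Bool) : List String :=
  match ls with
  | [] => []
  | l :: rest =>
    if pvIsBdry l then pvR rest true
    else if inB then
      (if pvIsTop l then l :: pvR rest false else pvR rest true)
    else l :: pvR rest false

-- the sections of a list that starts at a header (or is empty)
def pvGroups (ls : List String) : List (List String) :=
  match ls with
  | [] => []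
  | l :: rest =>
      (l :: rest.takeWhile (fun x => !pvIsTop x)) :: pvGroups (rest.dropWhile (fun x => !pvIsTop x))
  termination_by ls.length
  decreasing_by exact Nat.lt_succ_of_le (List.length_dropWhile_le _ _)

-- concatenation of the non-Boundaries sections
def pvCF (gs : List (List String)) : List String :=
  match gs with
  | [] => []
  | g :: gs => if pvIsBdry (g.headD "") then pvCF gs else g ++ pvCF gs

lemma pvAStep_eq (st : List String × Bool) (line : String) :
    pvAStep st line =
      if pvIsBdry line then (st.1, true)
      else if st.2 then
        (if pvIsTop line then (st.1 ++ [line], false) else (st.1, true))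
      else (st.1 ++ [line], st.2) := rfl

lemma pvGroups_cons (l : String) (rest : List String) :
    pvGroups (l :: rest) =
      (l :: rest.takeWhile (fun x => !pvIsTop x)) ::
        pvGroups (rest.dropWhile (fun x => !pvIsTop x)) := by
  rw [pvGroups]

lemma pv_bdry_top (l : String) (h : pvIsBdry l = true) : pvIsTop l = true := by
  unfold pvIsBdry at h
  rw [show pvIsTop l = (PySem.Str.startswith (PySem.Str.strip l) "## " &&
      !PySem.Str.startswith (PySem.Str.strip l) "### ") from rfl,
    Bool.and_eq_true, Bool.not_eq_true']
  simp only [PySem.Str.startswith_eq, PySem.Chars.startswith_iff] at h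
  constructor
  · simp only [PySem.Str.startswith_eq, PySem.Chars.startswith_iff]
    exact List.IsPrefix.trans (by decide) h
  · rw [← Bool.not_eq_true]
    simp only [PySem.Str.startswith_eq, PySem.Chars.startswith_iff]
    intro h3
    have := List.prefix_of_prefix_length_le h3 h (by decide)
    revert this; decide

lemma pv_fold_A (ls : List String) : ∀ (acc : List String) (b : Bool),
    (ls.foldl pvAStep (acc, b)).1 = acc ++ pvR ls b := by
  induction ls with
  | nil => intro acc b; simp [pvR]
  | cons l rest ih =>
    intro acc b
    rw [List.foldl_cons, pvAStep_eq]
    by_cases hb : pvIsBdry l = true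
    · simp [pvR, hb, ih]
    · cases b with
      | false => simp [pvR, hb, ih]
      | true =>
        by_cases ht : pvIsTop l = true <;> simp [pvR, hb, ht, ih]

lemma pv_fold_B (ls : List String) : ∀ (A : List (List String)) (c : List String),
    ls.foldl pvBStep (A ++ [c]) =
      A ++ (c ++ ls.takeWhile (fun x => !pvIsTop x)) ::
        pvGroups (ls.dropWhile (fun x => !pvIsTop x)) := by
  induction ls with
  | nil => intro A c; simp [pvGroups]
  | cons l rest ih =>
    intro A c
    rw [List.foldl_cons]
    by_cases ht : pvIsTop l = true
    · have h1 : pvBStep (A ++ [c]) l = A ++ [c] ++ [[l]] := by simp [pvBStep, ht]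
      rw [h1, ih (A ++ [c]) [l]]
      simp [ht, pvGroups_cons]
    · have h1 : pvBStep (A ++ [c]) l = A ++ [c ++ [l]] := by simp [pvBStep, ht]
      rw [h1, ih A (c ++ [l])]
      simp [ht]

lemma pv_fold_F (gs : List (List String)) : ∀ (acc : List String),
    gs.foldl pvFStep acc = acc ++ pvCF gs := by
  induction gs with
  | nil => intro acc; simp [pvCF]
  | cons g gs ih =>
    intro acc
    rw [List.foldl_cons,
      show pvFStep acc g = if pvIsBdry (g.headD "") then acc else acc ++ g from rfl,
      show pvCF (g :: gs) = if pvIsBdry (g.headD "") then pvCF gs else g ++ pvCF gs from rfl]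
    by_cases hb : pvIsBdry (g.headD "") = true
    · rw [if_pos hb, if_pos hb, ih]
    · rw [if_neg hb, if_neg hb, ih, List.append_assoc]

lemma pv_R_groups : ∀ (n : Nat) (ls : List String), ls.length ≤ n →
    (pvR ls false = ls.takeWhile (fun x => !pvIsTop x) ++
        pvCF (pvGroups (ls.dropWhile (fun x => !pvIsTop x)))) ∧
    (pvR ls true = pvCF (pvGroups (ls.dropWhile (fun x => !pvIsTop x)))) := by
  intro n
  induction n with
  | zero =>
    intro ls h
    have : ls = [] := List.eq_nil_of_length_eq_zero (Nat.le_zero.mp h)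
    subst this; simp [pvR, pvGroups, pvCF]
  | succ n ih =>
    intro ls h
    cases ls with
    | nil => simp [pvR, pvGroups, pvCF]
    | cons l rest =>
      have hrest : rest.length ≤ n := Nat.lt_succ_iff.mp h
      by_cases hb : pvIsBdry l = true
      · have ht := pv_bdry_top l hb
        constructor <;>
        · first
            | rw [show pvR (l :: rest) false = pvR rest true from by simp [pvR, hb]]
            | rw [show pvR (l :: rest) true = pvR rest true from by simp [pvR, hb]]
          rw [(ih rest hrest).2]
          simp [ht, pvGroups_cons, pvCF, hb]
      · by_cases ht : pvIsTop l = true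
        · constructor <;>
          · first
              | rw [show pvR (l :: rest) false = l :: pvR rest false from by simp [pvR, hb]]
              | rw [show pvR (l :: rest) true = l :: pvR rest false from by simp [pvR, hb, ht]]
            rw [(ih rest hrest).1]
            simp [ht, pvGroups_cons, pvCF, hb]
        · constructor
          · rw [show pvR (l :: rest) false = l :: pvR rest false from by simp [pvR, hb],
              (ih rest hrest).1]
            simp [ht]
          · rw [show pvR (l :: rest) true = pvR rest true from by simp [pvR, hb, ht],
              (ih rest hrest).2]
            simp [ht]

-- ===== VERDICT (by name: the statement is the Claim_ definition above) =====
theorem remove_boundaries_section_py_spec : Claim_equal_remove_boundaries_section_py := by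
  intro lines _
  unfold Spec_remove_boundaries_section_py remove_boundaries_section_py
  rw [show remove_boundaries_section_py_alt lines =
      ((lines.dropWhile (fun x => !pvIsTop x)).foldl pvBStep []).foldl pvFStep
        (lines.takeWhile (fun x => !pvIsTop x)) from rfl]
  rw [pv_fold_A lines [] false, List.nil_append]
  rw [(pv_R_groups lines.length lines le_rfl).1]
  rcases hdw : lines.dropWhile (fun x => !pvIsTop x) with _ | ⟨l, rest⟩
  · simp [pvGroups, pvCF]
  · have ht : pvIsTop l = true := by
      have := List.head?_dropWhile_not (fun x => !pvIsTop x) lines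
      rw [hdw] at this; simpa using this
    rw [List.foldl_cons, show pvBStep [] l = [] ++ [[l]] from by simp [pvBStep, ht],
      pv_fold_B, pv_fold_F, List.nil_append, pvGroups_cons]
    simp
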